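-- pv_equiv track=rewrite | github.com/mattromano/flipai-twitter | src/twitter_generator.py | _select_best_screenshot
-- ===== SOURCE A (Python) =====
-- from typing import Dict, Any, List, Optional, Tuple
--
-- def _select_best_screenshot(artifacts: List[Dict[str, Any]],
--                           screenshots: List[str]) -> Optional[str]:
--     """
--     Select the best screenshot for the tweet.
--
--     Args:
--         artifacts: List of captured artifacts
--         screenshots: List of screenshot paths
--
--     Returns:
--         Path to the best screenshot, or None
--     """
--     if not artifacts and not screenshots:
--         return None
--
--     # Prioritize chart artifacts
--     chart_artifacts = [a for a in artifacts if a.get("type") == "chart"]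
--     if chart_artifacts:
--         return chart_artifacts[0].get("screenshot")
--
--     # Then table artifacts
--     table_artifacts = [a for a in artifacts if a.get("type") == "table"]
--     if table_artifacts:
--         return table_artifacts[0].get("screenshot")
--
--     # Then any other artifacts
--     if artifacts:
--         return artifacts[0].get("screenshot")
--
--     # Finally, any screenshots
--     if screenshots:
--         return screenshots[0]
--
--     return None
-- ===== SOURCE B (Python) =====
-- def _select_best_screenshot(artifacts, screenshots):
--     first_table = None
--     first_any = None
--     for a in artifacts:
--         t = a.get("type")
--         if t == "chart":
--             return a.get("screenshot")
--         if t == "table" and first_table is None: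
--             first_table = a
--         if first_any is None:
--             first_any = a
--     if first_table is not None:
--         return first_table.get("screenshot")
--     if first_any is not None:
--         return first_any.get("screenshot")
--     if screenshots:
--         return screenshots[0]
--     return None
-- ===== Notes on version B (the rewrite author's own statement) =====
-- stated objective: alternative
-- what changed: Replaces A's two full filter passes plus index lookups with a single loop over artifacts that keeps first-table/first-any slots and returns early on the first chart.
import Mathlib
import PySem

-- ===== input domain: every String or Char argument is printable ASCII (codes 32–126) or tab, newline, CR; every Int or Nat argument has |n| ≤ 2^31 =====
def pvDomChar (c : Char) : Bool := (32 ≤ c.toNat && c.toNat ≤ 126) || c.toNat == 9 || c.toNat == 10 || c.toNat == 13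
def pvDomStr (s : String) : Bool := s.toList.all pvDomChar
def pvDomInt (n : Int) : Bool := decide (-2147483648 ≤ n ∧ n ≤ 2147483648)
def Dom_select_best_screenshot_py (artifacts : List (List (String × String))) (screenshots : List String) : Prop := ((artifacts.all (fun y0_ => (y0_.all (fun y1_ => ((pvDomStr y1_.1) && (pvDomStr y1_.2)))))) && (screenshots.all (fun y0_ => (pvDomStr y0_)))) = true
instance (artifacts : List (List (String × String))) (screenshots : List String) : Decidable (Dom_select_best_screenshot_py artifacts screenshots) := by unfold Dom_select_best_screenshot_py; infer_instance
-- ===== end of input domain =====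

-- B replaces A's separate chart/table filter passes with one early-exit loop keeping first-table/first-any slots (alternative decomposition, same cost).
-- ===== PORT A =====
-- a.get(k) on the assoc-list dict is PySem.Dict.get? (first match); a.get("type") == "chart" is Option-equality with some.
def select_best_screenshot_py (artifacts : List (List (String × String))) (screenshots : List String) : Option String :=
  if artifacts = [] ∧ screenshots = [] then none
  else
    match (artifacts.filter (fun a => (PySem.Dict.mk a).get? "type" == some "chart")) with
    | c :: _ => (PySem.Dict.mk c).get? "screenshot"
    | [] =>
      match (artifacts.filter (fun a => (PySem.Dict.mk a).get? "type" == some "table")) with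
      | t :: _ => (PySem.Dict.mk t).get? "screenshot"
      | [] =>
        match artifacts with
        | a :: _ => (PySem.Dict.mk a).get? "screenshot"
        | [] =>
          match screenshots with
          | s :: _ => some s
          | [] => none

-- ===== PORT B =====
-- One pass keeping first_table / first_any slots; early return on the first chart (B's loop).
def sbsLoop (arts : List (List (String × String))) (ft fa : Option (List (String × String))) (screenshots : List String) : Option String :=
  match arts with
  | [] =>
    match ft with
    | some t => (PySem.Dict.mk t).get? "screenshot"
    | none =>
      match fa with
      | some a => (PySem.Dict.mk a).get? "screenshot"
      | none =>
        match screenshots with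
        | s :: _ => some s
        | [] => none
  | a :: rest =>
    let t := (PySem.Dict.mk a).get? "type"
    if t == some "chart" then (PySem.Dict.mk a).get? "screenshot"
    else
      sbsLoop rest
        (if t == some "table" && ft.isNone then some a else ft)
        (if fa.isNone then some a else fa)
        screenshots

def select_best_screenshot_py_alt (artifacts : List (List (String × String))) (screenshots : List String) : Option String :=
  sbsLoop artifacts none none screenshots

-- ===== PRECONDITION & SPEC =====
def Spec_select_best_screenshot_py (artifacts : List (List (String × String))) (screenshots : List String) (out : Option String) : Prop := out = select_best_screenshot_py_alt artifacts screenshots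
instance (artifacts : List (List (String × String))) (screenshots : List String) (out : Option String) : Decidable (Spec_select_best_screenshot_py artifacts screenshots out) := by unfold Spec_select_best_screenshot_py; infer_instance

-- ===== CLAIM (what is proved, stated in full; the proofs are below) =====
def Claim_equal_select_best_screenshot_py : Prop := ∀ (artifacts : List (List (String × String))) (screenshots : List String), Dom_select_best_screenshot_py artifacts screenshots → Spec_select_best_screenshot_py artifacts screenshots (select_best_screenshot_py artifacts screenshots)

-- ===== LEMMAS AND PROOFS =====

-- ===== VERDICT (by name: the statement is the Claim_ definition above) =====
lemma sbsLoop_spec (arts : List (List (String × String))) (ft fa : Option (List (String × String))) (ss : List String) :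
    sbsLoop arts ft fa ss =
      match (arts.filter (fun a => (PySem.Dict.mk a).get? "type" == some "chart")) with
      | c :: _ => (PySem.Dict.mk c).get? "screenshot"
      | [] =>
        match ft with
        | some t => (PySem.Dict.mk t).get? "screenshot"
        | none =>
          match (arts.filter (fun a => (PySem.Dict.mk a).get? "type" == some "table")) with
          | t :: _ => (PySem.Dict.mk t).get? "screenshot"
          | [] =>
            match fa with
            | some a => (PySem.Dict.mk a).get? "screenshot"
            | none =>
              match arts with
              | a :: _ => (PySem.Dict.mk a).get? "screenshot"
              | [] =>
                match ss with
                | s :: _ => some s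
                | [] => none := by
  induction arts generalizing ft fa with
  | nil => rfl
  | cons a rest ih =>
    by_cases hc : (PySem.Dict.mk a).get? "type" == some "chart"
    · simp [sbsLoop, hc]
    · simp only [sbsLoop, hc, if_false, Bool.false_eq_true, ih, List.filter_cons]
      by_cases ht : (PySem.Dict.mk a).get? "type" == some "table"
      · cases ft with
        | some t => simp [ht]
        | none => simp [ht]
      · simp only [ht, Bool.false_eq_true, if_false, Bool.false_and]
        all_goals try (cases ft with
          | some t => rfl
          | none =>
            cases fa with
            | some x => rfl
            | none =>
              simp only
              cases (rest.filter (fun a => (PySem.Dict.mk a).get? "type" == some "chart")) with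
              | cons c cr => rfl
              | nil =>
                cases (rest.filter (fun a => (PySem.Dict.mk a).get? "type" == some "table")) <;> rfl)

theorem select_best_screenshot_py_spec : Claim_equal_select_best_screenshot_py := by
  intro arts ss _
  unfold Spec_select_best_screenshot_py select_best_screenshot_py select_best_screenshot_py_alt
  rw [sbsLoop_spec]
  by_cases h : arts = [] ∧ ss = []
  · obtain ⟨h1, h2⟩ := h; subst h1; subst h2; rfl
  · simp only [h, if_false]
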